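-- pv_equiv track=rewrite | github.com/rancorjoy/SDP_SCADA | scripts/dcs_dict_utils.py | is_int_type
-- ===== SOURCE A (Python) =====
-- def is_int_type(s):
--     tokens = s.strip().split()
--
--     if not tokens:
--         return False
--
--     # Single-token special / typedef types
--     single_types = {
--         "int", "char", "wchar_t",
--         "int8_t", "int16_t", "int32_t", "int64_t",
--         "uint8_t", "uint16_t", "uint32_t", "uint64_t",
--         "ptrdiff_t", "size_t",
--         "byte", "word"
--     }
--
--     if len(tokens) == 1:
--         return tokens[0] in single_types or tokens[0] in {"signed", "unsigned"}
--
--     # Allowed specifiers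
--     sign = {"signed", "unsigned"}
--     size = {"short", "long"}
--     base = {"int"}
--
--     sign_count = 0
--     short_count = 0
--     long_count = 0
--     int_count = 0
--
--     for t in tokens:
--         if t in sign:
--             sign_count += 1
--         elif t == "short":
--             short_count += 1
--         elif t == "long":
--             long_count += 1
--         elif t == "int":
--             int_count += 1
--         else:
--             return False  # unknown token
--
--     # Rules based on C++ specifiers:
--
--     # Only one sign allowed
--     if sign_count > 1:
--         return False
--
--     # Can't mix short and long
--     if short_count > 0 and long_count > 0:
--         return False
--
--     # short appears at most once
--     if short_count > 1:
--         return False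
--
--     # long can appear once or twice (long long)
--     if long_count > 2:
--         return False
--
--     # If long appears twice, it's "long long"
--     if long_count == 2 and short_count > 0:
--         return False
--
--     # int can appear at most once
--     if int_count > 1:
--         return False
--
--     # At least one meaningful type specifier must exist
--     if short_count == 0 and long_count == 0 and int_count == 0:
--         return False
--
--     return True
-- ===== SOURCE B (Python) =====
-- _SINGLE = frozenset({
--     "int", "char", "wchar_t",
--     "int8_t", "int16_t", "int32_t", "int64_t",
--     "uint8_t", "uint16_t", "uint32_t", "uint64_t",
--     "ptrdiff_t", "size_t",
--     "byte", "word",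
--     "signed", "unsigned",
-- })
--
-- _SPECIFIERS = ("signed", "unsigned", "short", "long", "int")
--
--
-- def _gen_multi():
--     # every valid multi-token combination, keyed by its specifier-count vector
--     forms = set()
--     for sign in ((0, 0), (1, 0), (0, 1)):           # (signed, unsigned)
--         for size in ((0, 0), (1, 0), (0, 1), (0, 2)):  # (short, long)
--             for base in (0, 1):                      # int
--                 key = sign + size + (base,)
--                 if sum(key) >= 2 and size[0] + size[1] + base >= 1:
--                     forms.add(key)
--     return forms
--
--
-- _MULTI = _gen_multi()
--
--
-- def is_int_type(s):
--     tokens = s.strip().split()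
--     if not tokens:
--         return False
--     if len(tokens) == 1:
--         return tokens[0] in _SINGLE
--     key = tuple(tokens.count(w) for w in _SPECIFIERS)
--     return sum(key) == len(tokens) and key in _MULTI
-- ===== Notes on version B (the rewrite author's own statement) =====
-- stated objective: alternative
-- what changed: A's per-token counter loop with early return plus a seven-rule validation cascade is replaced by normalizing the token list into a specifier-count vector and looking it up in a precomputed whitelist of all accepted multi-token combinations (single tokens in one merged set).
import Mathlib
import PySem

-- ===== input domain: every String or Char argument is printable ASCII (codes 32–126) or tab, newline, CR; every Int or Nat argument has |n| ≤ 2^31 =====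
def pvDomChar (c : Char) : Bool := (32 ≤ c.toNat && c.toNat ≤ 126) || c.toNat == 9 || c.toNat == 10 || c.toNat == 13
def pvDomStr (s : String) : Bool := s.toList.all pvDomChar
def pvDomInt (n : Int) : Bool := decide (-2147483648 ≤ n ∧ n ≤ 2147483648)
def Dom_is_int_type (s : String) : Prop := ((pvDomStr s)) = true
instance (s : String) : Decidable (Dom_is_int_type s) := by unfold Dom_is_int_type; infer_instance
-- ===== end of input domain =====

-- B replaces A's per-token counter loop and seven-rule cascade by a single lookup of the
-- token-count vector in a precomputed whitelist of accepted specifier combinations (objective: alternative/table-driven).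

-- ===== PORT A =====
def aSingleTypes : PySem.Set String :=
  PySem.Set.ofList
    ["int", "char", "wchar_t",
     "int8_t", "int16_t", "int32_t", "int64_t",
     "uint8_t", "uint16_t", "uint32_t", "uint64_t",
     "ptrdiff_t", "size_t",
     "byte", "word"]

def aSign : PySem.Set String := PySem.Set.ofList ["signed", "unsigned"]

-- the body of A's 'for t in tokens' loop (early 'return False' = the none state)
def aStep (st : Option (Nat × Nat × Nat × Nat)) (t : String) : Option (Nat × Nat × Nat × Nat) :=
  match st with
  | none => none
  | some (sc, shc, lc, ic) =>
    if PySem.Set.contains aSign t then some (sc + 1, shc, lc, ic)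
    else if t == "short" then some (sc, shc + 1, lc, ic)
    else if t == "long" then some (sc, shc, lc + 1, ic)
    else if t == "int" then some (sc, shc, lc, ic + 1)
    else none

def is_int_type (s : String) : Bool :=
  let tokens := PySem.Str.split₀ (PySem.Str.strip s)
  if tokens.isEmpty then false
  else if tokens.length == 1 then
    PySem.Set.contains aSingleTypes tokens[0]! || PySem.Set.contains aSign tokens[0]!
  else
    match tokens.foldl aStep (some (0, 0, 0, 0)) with
    | none => false  -- unknown token
    | some (sign_count, short_count, long_count, int_count) =>
      if sign_count > 1 then false
      else if short_count > 0 && long_count > 0 then false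
      else if short_count > 1 then false
      else if long_count > 2 then false
      else if long_count == 2 && short_count > 0 then false
      else if int_count > 1 then false
      else if short_count == 0 && long_count == 0 && int_count == 0 then false
      else true

-- ===== PORT B =====
def bSingle : PySem.Set String :=
  PySem.Set.ofList
    ["int", "char", "wchar_t",
     "int8_t", "int16_t", "int32_t", "int64_t",
     "uint8_t", "uint16_t", "uint32_t", "uint64_t",
     "ptrdiff_t", "size_t",
     "byte", "word",
     "signed", "unsigned"]

-- _gen_multi(): the whitelist of accepted count vectors (signed, unsigned, short, long, int)
def bMulti : PySem.Set (Nat × Nat × Nat × Nat × Nat) :=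
  ([((0:Nat),(0:Nat)), (1,0), (0,1)]).foldl (fun acc sign =>
    ([((0:Nat),(0:Nat)), (1,0), (0,1), (0,2)]).foldl (fun acc size =>
      (([0,1]) : List Nat).foldl (fun acc base =>
        if 2 ≤ sign.1 + sign.2 + size.1 + size.2 + base ∧ 1 ≤ size.1 + size.2 + base
        then PySem.Set.add acc (sign.1, sign.2, size.1, size.2, base)
        else acc) acc) acc) PySem.Set.empty

def is_int_type_alt (s : String) : Bool :=
  let tokens := PySem.Str.split₀ (PySem.Str.strip s)
  if tokens.isEmpty then false
  else if tokens.length == 1 then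
    PySem.Set.contains bSingle tokens[0]!
  else
    let key := (tokens.count "signed", tokens.count "unsigned",
                tokens.count "short", tokens.count "long", tokens.count "int")
    (key.1 + key.2.1 + key.2.2.1 + key.2.2.2.1 + key.2.2.2.2 == tokens.length)
      && PySem.Set.contains bMulti key

-- ===== PRECONDITION & SPEC =====
def Spec_is_int_type (s : String) (out : Bool) : Prop := out = is_int_type_alt s
instance (s : String) (out : Bool) : Decidable (Spec_is_int_type s out) := by unfold Spec_is_int_type; infer_instance

-- ===== CLAIM (what is proved, stated in full; the proofs are below) =====
def Claim_equal_is_int_type : Prop := ∀ (s : String), Dom_is_int_type s → Spec_is_int_type s (is_int_type s)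

-- ===== LEMMAS AND PROOFS =====

-- a token is "known" iff it is one of the five specifier words
def knownTok (t : String) : Bool :=
  t == "signed" || t == "unsigned" || t == "short" || t == "long" || t == "int"

lemma foldl_aStep_none (l : List String) : l.foldl aStep none = none := by
  induction l with
  | nil => rfl
  | cons t rest ih => simpa [aStep] using ih

lemma foldl_aStep_char (tokens : List String) : ∀ a b c d : Nat,
    tokens.foldl aStep (some (a, b, c, d)) =
      if tokens.all knownTok then
        some (a + (tokens.count "signed" + tokens.count "unsigned"),
              b + tokens.count "short", c + tokens.count "long", d + tokens.count "int")
      else none := by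
  induction tokens with
  | nil => intro a b c d; simp
  | cons t rest ih =>
    intro a b c d
    by_cases h1 : t = "signed"
    · subst h1
      simp [aStep, aSign, List.all_cons, knownTok, ih]
      split <;> simp <;> omega
    · by_cases h2 : t = "unsigned"
      · subst h2
        simp [aStep, aSign, List.all_cons, knownTok, ih]
        split <;> simp <;> omega
      · by_cases h3 : t = "short"
        · subst h3
          simp [aStep, aSign, List.all_cons, knownTok, ih]
          split <;> simp <;> omega
        · by_cases h4 : t = "long"
          · subst h4
            simp [aStep, aSign, List.all_cons, knownTok, ih]
            split <;> simp <;> omega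
          · by_cases h5 : t = "int"
            · subst h5
              simp [aStep, aSign, List.all_cons, knownTok, ih]
              split <;> simp <;> omega
            · simp [aStep, aSign, List.all_cons, knownTok, h1, h2, h3, h4, h5,
                    foldl_aStep_none]

lemma count_sum_le (tokens : List String) :
    tokens.count "signed" + tokens.count "unsigned" + tokens.count "short"
      + tokens.count "long" + tokens.count "int" ≤ tokens.length := by
  induction tokens with
  | nil => simp
  | cons t rest ih =>
    simp only [List.count_cons, List.length_cons]
    by_cases h1 : t = "signed" <;> by_cases h2 : t = "unsigned" <;>
      by_cases h3 : t = "short" <;> by_cases h4 : t = "long" <;>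
      by_cases h5 : t = "int" <;>
      simp_all <;> omega

lemma count_sum_eq_iff (tokens : List String) :
    (tokens.count "signed" + tokens.count "unsigned" + tokens.count "short"
      + tokens.count "long" + tokens.count "int" = tokens.length)
      ↔ tokens.all knownTok = true := by
  induction tokens with
  | nil => simp
  | cons t rest ih =>
    have hle := count_sum_le rest
    by_cases hall : rest.all knownTok = true
    · have hsum := ih.mpr hall
      by_cases h1 : t = "signed" <;> by_cases h2 : t = "unsigned" <;>
        by_cases h3 : t = "short" <;> by_cases h4 : t = "long" <;>
        by_cases h5 : t = "int" <;>
        simp [List.count_cons, List.all_cons, knownTok,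
              h1, h2, h3, h4, h5, hall] <;> omega
    · have hne : ¬ (rest.count "signed" + rest.count "unsigned" + rest.count "short"
          + rest.count "long" + rest.count "int" = rest.length) := fun h => hall (ih.mp h)
      by_cases h1 : t = "signed" <;> by_cases h2 : t = "unsigned" <;>
        by_cases h3 : t = "short" <;> by_cases h4 : t = "long" <;>
        by_cases h5 : t = "int" <;>
        simp [List.count_cons, List.all_cons, knownTok,
              h1, h2, h3, h4, h5, hall] <;> omega

-- the whitelist bMulti, fully evaluated
def bMultiLit : List (Nat × Nat × Nat × Nat × Nat) := [(0, 0, 1, 0, 1), (0, 0, 0, 1, 1), (0, 0, 0, 2, 0), (0, 0, 0, 2, 1), (1, 0, 0, 0, 1), (1, 0, 1, 0, 0), (1, 0, 1, 0, 1), (1, 0, 0, 1, 0), (1, 0, 0, 1, 1), (1, 0, 0, 2, 0), (1, 0, 0, 2, 1), (0, 1, 0, 0, 1), (0, 1, 1, 0, 0), (0, 1, 1, 0, 1), (0, 1, 0, 1, 0), (0, 1, 0, 1, 1), (0, 1, 0, 2, 0), (0, 1, 0, 2, 1)]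

lemma bMulti_eq : bMulti = bMultiLit := by rfl

lemma lit_bounds : ∀ m ∈ bMultiLit, m.1 ≤ 1 ∧ m.2.1 ≤ 1 ∧ m.2.2.1 ≤ 1 ∧ m.2.2.2.1 ≤ 2 ∧ m.2.2.2.2 ≤ 1 := by decide

lemma lit_iff_small : ∀ (sg u : Fin 2) (sh : Fin 2) (l : Fin 3) (i : Fin 2),
    (bMultiLit.contains ((sg : Nat), (u : Nat), (sh : Nat), (l : Nat), (i : Nat)) = true ↔
      ((sg:Nat) ≤ 1 ∧ (u:Nat) ≤ 1 ∧ (sg:Nat) + (u:Nat) ≤ 1 ∧ (sh:Nat) ≤ 1 ∧ (l:Nat) ≤ 2 ∧ (i:Nat) ≤ 1 ∧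
       ¬(0 < (sh:Nat) ∧ 0 < (l:Nat)) ∧ 1 ≤ (sh:Nat) + (l:Nat) + (i:Nat) ∧ 2 ≤ (sg:Nat) + (u:Nat) + (sh:Nat) + (l:Nat) + (i:Nat))) := by decide

lemma bMulti_member_iff (sg u sh l i : Nat) :
    PySem.Set.contains bMulti (sg, u, sh, l, i) = true ↔
      (sg ≤ 1 ∧ u ≤ 1 ∧ sg + u ≤ 1 ∧ sh ≤ 1 ∧ l ≤ 2 ∧ i ≤ 1 ∧
       ¬(0 < sh ∧ 0 < l) ∧ 1 ≤ sh + l + i ∧ 2 ≤ sg + u + sh + l + i) := by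
  rw [bMulti_eq]
  show bMultiLit.contains (sg, u, sh, l, i) = true ↔ _
  by_cases hsm : sg < 2 ∧ u < 2 ∧ sh < 2 ∧ l < 3 ∧ i < 2
  · exact lit_iff_small ⟨sg, hsm.1⟩ ⟨u, hsm.2.1⟩ ⟨sh, hsm.2.2.1⟩ ⟨l, hsm.2.2.2.1⟩ ⟨i, hsm.2.2.2.2⟩
  · constructor
    · intro hc
      have hm : (sg, u, sh, l, i) ∈ bMultiLit := by
        simpa [List.contains_eq_mem] using hc
      have hb := lit_bounds _ hm
      simp only [] at hb
      omega
    · intro hconds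
      exfalso
      omega

lemma single_member (t : String) :
    (PySem.Set.contains aSingleTypes t || PySem.Set.contains aSign t)
      = PySem.Set.contains bSingle t := by
  simp only [aSingleTypes, aSign, bSingle, PySem.Set.contains, PySem.Set.ofList_eq_foldl]
  simp [PySem.Set.add, Bool.or_assoc]

-- ===== VERDICT (by name: the statement is the Claim_ definition above) =====
set_option maxHeartbeats 1600000 in
theorem is_int_type_spec : Claim_equal_is_int_type := by
  intro s _
  unfold Spec_is_int_type is_int_type is_int_type_alt
  simp only []
  generalize PySem.Str.split₀ (PySem.Str.strip s) = tokens
  cases tokens with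
  | nil => rfl
  | cons t rest =>
    cases rest with
    | nil =>
      simpa using single_member t
    | cons r rs =>
      have hlen2 : ¬ (((t :: r :: rs).length == 1) = true) := by simp
      simp only [List.isEmpty_cons, Bool.false_eq_true, if_false]
      rw [if_neg hlen2, if_neg hlen2]
      rw [foldl_aStep_char (t :: r :: rs) 0 0 0 0]
      by_cases hall : (t :: r :: rs).all knownTok = true
      · rw [if_pos hall]
        have hsum := (count_sum_eq_iff (t :: r :: rs)).mpr hall
        have hbeq : ((t :: r :: rs).count "signed" + (t :: r :: rs).count "unsigned"
            + (t :: r :: rs).count "short" + (t :: r :: rs).count "long"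
            + (t :: r :: rs).count "int" == (t :: r :: rs).length) = true := by
          simpa using hsum
        rw [hbeq, Bool.true_and]
        have hiff := bMulti_member_iff ((t :: r :: rs).count "signed")
          ((t :: r :: rs).count "unsigned") ((t :: r :: rs).count "short")
          ((t :: r :: rs).count "long") ((t :: r :: rs).count "int")
        have hlen : (t :: r :: rs).length = rs.length + 2 := by simp
        cases hc : PySem.Set.contains bMulti ((t :: r :: rs).count "signed",
            (t :: r :: rs).count "unsigned", (t :: r :: rs).count "short",
            (t :: r :: rs).count "long", (t :: r :: rs).count "int") with
        | true =>
          have hconds := hiff.mp hc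
          simp only [Nat.zero_add]
          split_ifs with h1 h2 h3 h4 h5 h6 h7 <;>
            first
              | rfl
              | (exfalso
                 simp only [Bool.and_eq_true, decide_eq_true_eq, beq_iff_eq] at *
                 omega)
        | false =>
          have hnconds := fun h => (ne_true_of_eq_false hc) (hiff.mpr h)
          simp only [Nat.zero_add]
          split_ifs with h1 h2 h3 h4 h5 h6 h7 <;>
            first
              | rfl
              | (exfalso
                 simp only [Bool.and_eq_true, decide_eq_true_eq, beq_iff_eq] at h1 h2 h3 h4 h5 h6 h7
                 exact hnconds (by omega))
      · rw [if_neg hall]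
        have hne : ¬ ((t :: r :: rs).count "signed" + (t :: r :: rs).count "unsigned"
            + (t :: r :: rs).count "short" + (t :: r :: rs).count "long"
            + (t :: r :: rs).count "int" = (t :: r :: rs).length) :=
          fun h => hall ((count_sum_eq_iff (t :: r :: rs)).mp h)
        have hne' : ((t :: r :: rs).count "signed" + (t :: r :: rs).count "unsigned"
            + (t :: r :: rs).count "short" + (t :: r :: rs).count "long"
            + (t :: r :: rs).count "int" == (t :: r :: rs).length) = false :=
          beq_eq_false_iff_ne.mpr hne
        rw [hne', Bool.false_and]
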